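-- pv_equiv track=rewrite | github.com/darkkeks/telegram-bots | core/src/main/generate/generate-model.py | process_type
-- ===== SOURCE A (Python) =====
-- CUSTOM_TYPES = {
--     'Chat': {
--         'type': 'ChatType'
--     },
--     'SendChatActionRequest': {
--         'action': 'ChatAction'
--     },
--     '__GLOBAL__': {
--         'parseMode': 'ParseMode'
--     },
-- }
--
-- def process_type(typename, field_name, type_name, desc):
--     if type_name in CUSTOM_TYPES and field_name in CUSTOM_TYPES[type_name]:
--         return CUSTOM_TYPES[type_name][field_name]
--
--     if field_name in CUSTOM_TYPES['__GLOBAL__']: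
--         return CUSTOM_TYPES['__GLOBAL__'][field_name]
--
--     while typename.startswith('Array of '):
--         typename = f"List<{process_type(typename.replace('Array of ', '', 1), field_name, type_name, desc)}>"
--
--     if ' or ' in typename:
--         if 'Markup' in typename:
--             typename = 'Markup'
--         else:
--             typename = typename.split(' or ')[0]
--
--     if ', ' in typename:
--         if 'InputMedia' in typename:
--             typename = 'InputMedia'
--         else:
--             raise Exception(f'Unknown type {typename}')
--
--     if typename == 'Integer':
--         if '64 bit' in desc or field_name.lower().endswith('chatid'):
--             typename = 'Long'
--         else:
--             typename = 'Int'
--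
--     if typename == 'True':
--         typename = 'Boolean'
--
--     if typename == 'Float number':
--         typename = 'Double'
--
--     return typename
-- ===== SOURCE B (Python) =====
-- CUSTOM_TYPES = {
--     'Chat': {
--         'type': 'ChatType'
--     },
--     'SendChatActionRequest': {
--         'action': 'ChatAction'
--     },
--     '__GLOBAL__': {
--         'parseMode': 'ParseMode'
--     },
-- }
--
-- def process_type(typename, field_name, type_name, desc):
--     if type_name in CUSTOM_TYPES and field_name in CUSTOM_TYPES[type_name]:
--         return CUSTOM_TYPES[type_name][field_name]
--
--     if field_name in CUSTOM_TYPES['__GLOBAL__']: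
--         return CUSTOM_TYPES['__GLOBAL__'][field_name]
--
--     # strip the 'Array of ' layers iteratively, counting the nesting depth
--     depth = 0
--     base = typename
--     while base.startswith('Array of '):
--         base = base[len('Array of '):]
--         depth += 1
--
--     if ' or ' in base:
--         base = 'Markup' if 'Markup' in base else base.split(' or ')[0]
--
--     if ', ' in base:
--         if 'InputMedia' in base:
--             base = 'InputMedia'
--         else:
--             raise Exception(f'Unknown type {base}')
--
--     if base == 'Integer':
--         base = 'Long' if '64 bit' in desc or field_name.lower().endswith('chatid') else 'Int'
--     elif base == 'True':
--         base = 'Boolean'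
--     elif base == 'Float number':
--         base = 'Double'
--
--     return 'List<' * depth + base + '>' * depth
-- ===== Notes on version B (the rewrite author's own statement) =====
-- stated objective: alternative
-- what changed: Replaces A's recursive while-loop (which strips one 'Array of ' layer per recursive call, re-applies every type rule to each re-wrapped 'List<...>' string, and rebuilds layer by layer) with a single iterative pass that strips all 'Array of ' prefixes counting the nesting depth, applies the scalar type rules once to the bare base type, and then wraps it in 'List<...>' depth times.
import Mathlib
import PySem

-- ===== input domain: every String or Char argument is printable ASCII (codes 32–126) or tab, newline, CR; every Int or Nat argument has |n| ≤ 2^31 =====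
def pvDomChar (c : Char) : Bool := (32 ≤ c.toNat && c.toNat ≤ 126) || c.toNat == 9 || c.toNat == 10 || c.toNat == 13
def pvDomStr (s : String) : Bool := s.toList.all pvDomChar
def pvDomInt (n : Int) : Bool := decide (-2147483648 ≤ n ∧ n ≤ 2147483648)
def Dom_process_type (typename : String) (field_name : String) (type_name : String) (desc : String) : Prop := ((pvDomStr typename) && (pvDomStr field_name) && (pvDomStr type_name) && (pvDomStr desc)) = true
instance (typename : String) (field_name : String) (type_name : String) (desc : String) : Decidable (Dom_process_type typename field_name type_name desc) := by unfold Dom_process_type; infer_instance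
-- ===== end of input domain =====

set_option maxRecDepth 16384

-- B replaces A's recursive strip-one-layer-rewrap-recheck loop by one iterative strip of all
-- 'Array of ' prefixes, one application of the scalar rules to the base, and a depth-fold rewrap
-- (objective: alternative; A's raise on comma-separated element types is excluded by Pre_).

-- ===== PORT A =====
-- the module-level CUSTOM_TYPES dict (shared context for both ports)
def CUSTOM_TYPES : PySem.Dict String (PySem.Dict String String) :=
  ((PySem.Dict.empty.insert "Chat" (PySem.Dict.empty.insert "type" "ChatType")).insert
      "SendChatActionRequest" (PySem.Dict.empty.insert "action" "ChatAction")).insert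
    "__GLOBAL__" (PySem.Dict.empty.insert "parseMode" "ParseMode")

-- typename.replace('Array of ', '', 1): replace the FIRST occurrence only; exact for a
-- non-empty pattern (PySem.Chars.replace replaces all occurrences, so the count=1 form is ported by hand via find)
def pvReplace1 (s old new : List Char) : List Char :=
  let i := PySem.Chars.find s old
  if i = -1 then s else s.take i.toNat ++ new ++ s.drop (i.toNat + old.length)

-- A's body and its while-loop, mutually recursive exactly as in the Python (the recursive call
-- inside the f-string re-enters process_type); fuel is only a totality device — typename shrinks
-- by 9 characters per nesting level, so `length + 2` fuel at the top is never exhausted.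
-- Where A RAISES (`Unknown type …`) the port returns [] — those inputs are excluded by Pre_.
mutual
def ptA : Nat → List Char → String → String → String → List Char
  | 0, tn, _, _, _ => tn
  | Nat.succ f, tn, fn, tyn, d =>
    if CUSTOM_TYPES.contains tyn && (CUSTOM_TYPES.getD tyn PySem.Dict.empty).contains fn then
      ((CUSTOM_TYPES.getD tyn PySem.Dict.empty).getD fn "").toList
    else if (CUSTOM_TYPES.getD "__GLOBAL__" PySem.Dict.empty).contains fn then
      ((CUSTOM_TYPES.getD "__GLOBAL__" PySem.Dict.empty).getD fn "").toList
    else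
      let tn1 := ptAWhile f tn fn tyn d
      let tn2 := if PySem.Chars.isIn " or ".toList tn1 then
          (if PySem.Chars.isIn "Markup".toList tn1 then "Markup".toList
           else (PySem.Chars.splitOn tn1 " or ".toList).headD [])
        else tn1
      let tn3 := if PySem.Chars.isIn ", ".toList tn2 then
          (if PySem.Chars.isIn "InputMedia".toList tn2 then "InputMedia".toList
           else ([] : List Char))  -- Python raises Exception here; outside Pre_
        else tn2
      let tn4 := if tn3 = "Integer".toList then
          (if PySem.Str.isIn "64 bit" d || PySem.Str.endswith (PySem.Str.lower fn) "chatid" then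
            "Long".toList else "Int".toList)
        else tn3
      let tn5 := if tn4 = "True".toList then "Boolean".toList else tn4
      if tn5 = "Float number".toList then "Double".toList else tn5
def ptAWhile : Nat → List Char → String → String → String → List Char
  | 0, tn, _, _, _ => tn
  | Nat.succ f, tn, fn, tyn, d =>
    if PySem.Chars.startswith tn "Array of ".toList then
      ptAWhile f ("List<".toList ++ ptA f (pvReplace1 tn "Array of ".toList []) fn tyn d ++ ">".toList) fn tyn d
    else tn
end

def process_type (typename : String) (field_name : String) (type_name : String) (desc : String) : String :=
  String.ofList (ptA (typename.toList.length + 2) typename.toList field_name type_name desc)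

-- ===== PORT B =====
-- strip every leading 'Array of ', returning (nesting depth, base type name);
-- the fuel (the string length) only makes the while loop structurally terminating
def ptStripGo : Nat → List Char → Nat × List Char
  | 0, tn => (0, tn)
  | Nat.succ f, tn =>
    if PySem.Chars.startswith tn "Array of ".toList then
      let p := ptStripGo f (tn.drop 9)
      (p.1 + 1, p.2)
    else (0, tn)

def ptStrip (tn : List Char) : Nat × List Char := ptStripGo tn.length tn

-- the scalar rules, applied once to the bare base typename (raise ported as [] — outside Pre_)
def ptTransform (b : List Char) (fn d : String) : List Char :=
  let b1 := if PySem.Chars.isIn " or ".toList b then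
      (if PySem.Chars.isIn "Markup".toList b then "Markup".toList
       else (PySem.Chars.splitOn b " or ".toList).headD [])
    else b
  let b2 := if PySem.Chars.isIn ", ".toList b1 then
      (if PySem.Chars.isIn "InputMedia".toList b1 then "InputMedia".toList
       else ([] : List Char))  -- Python raises Exception here; outside Pre_
    else b1
  if b2 = "Integer".toList then
    (if PySem.Str.isIn "64 bit" d || PySem.Str.endswith (PySem.Str.lower fn) "chatid" then
      "Long".toList else "Int".toList)
  else if b2 = "True".toList then "Boolean".toList
  else if b2 = "Float number".toList then "Double".toList
  else b2

-- 'List<' * depth + base + '>' * depth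
def ptWrap (depth : Nat) (base : List Char) : List Char :=
  (List.replicate depth "List<".toList).flatten ++ base ++ List.replicate depth '>'

def process_type_alt (typename : String) (field_name : String) (type_name : String) (desc : String) : String :=
  if CUSTOM_TYPES.contains type_name && (CUSTOM_TYPES.getD type_name PySem.Dict.empty).contains field_name then
    (CUSTOM_TYPES.getD type_name PySem.Dict.empty).getD field_name ""
  else if (CUSTOM_TYPES.getD "__GLOBAL__" PySem.Dict.empty).contains field_name then
    (CUSTOM_TYPES.getD "__GLOBAL__" PySem.Dict.empty).getD field_name ""
  else
    let p := ptStrip typename.toList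
    String.ofList (ptWrap p.1 (ptTransform p.2 field_name desc))

-- ===== PRECONDITION & SPEC =====
-- the element type cut at the first ' or ' unless it mentions 'Markup' (used only by Pre_)
def pvOrCut (b : List Char) : List Char :=
  if PySem.Chars.isIn " or ".toList b then
    (if PySem.Chars.isIn "Markup".toList b then "Markup".toList
     else (PySem.Chars.splitOn b " or ".toList).headD [])
  else b

-- Pre_ excludes exactly the inputs on which A raises `Exception('Unknown type …')`: those where no
-- early (custom/global) return fires and the element type — typename after its maximal leading
-- repetition 'Array of '*k, cut at the first ' or ' unless it mentions 'Markup' — contains ', '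
-- but not 'InputMedia'.
def Pre_process_type (typename : String) (field_name : String) (type_name : String) (desc : String) : Prop :=
  (type_name = "Chat" ∧ field_name = "type") ∨
  (type_name = "SendChatActionRequest" ∧ field_name = "action") ∨
  field_name = "parseMode" ∨
  (∀ k : Nat, k ≤ typename.toList.length →
    (List.replicate k "Array of ".toList).flatten <+: typename.toList →
    ¬ (List.replicate (k + 1) "Array of ".toList).flatten <+: typename.toList →
    (PySem.Chars.isIn ", ".toList (pvOrCut (typename.toList.drop (9 * k))) = true →
     PySem.Chars.isIn "InputMedia".toList (pvOrCut (typename.toList.drop (9 * k))) = true))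
instance (typename : String) (field_name : String) (type_name : String) (desc : String) : Decidable (Pre_process_type typename field_name type_name desc) := by unfold Pre_process_type; infer_instance

def pvWitness_process_type : String × String × String × String :=
  ("Array of Integer", "message_ids", "Message", "a 64 bit id")

def Spec_process_type (typename : String) (field_name : String) (type_name : String) (desc : String) (out : String) : Prop := out = process_type_alt typename field_name type_name desc
instance (typename : String) (field_name : String) (type_name : String) (desc : String) (out : String) : Decidable (Spec_process_type typename field_name type_name desc out) := by unfold Spec_process_type; infer_instance

-- ===== CLAIM (what is proved, stated in full; the proofs are below) =====
def Claim_equal_process_type : Prop := ∀ (typename : String) (field_name : String) (type_name : String) (desc : String), Dom_process_type typename field_name type_name desc → Pre_process_type typename field_name type_name desc → Spec_process_type typename field_name type_name desc (process_type typename field_name type_name desc)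

-- ===== LEMMAS AND PROOFS =====

-- the raise-free condition on a bare base typename (the 4th disjunct of Pre_)
def PreBase (b : List Char) : Prop :=
  (PySem.Chars.isIn ", ".toList
      (if PySem.Chars.isIn " or ".toList b then
        (if PySem.Chars.isIn "Markup".toList b then "Markup".toList
         else (PySem.Chars.splitOn b " or ".toList).headD [])
       else b) = true) →
  PySem.Chars.isIn "InputMedia".toList
      (if PySem.Chars.isIn " or ".toList b then
        (if PySem.Chars.isIn "Markup".toList b then "Markup".toList
         else (PySem.Chars.splitOn b " or ".toList).headD [])
       else b) = true

lemma myHeadD (l : List (List Char)) : l.headD [] = (l.head?).getD [] := by cases l <;> simp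

-- head of splitOn.go once the accumulator is non-empty: the first pushed piece
lemma go_head_acc (sep : List Char) :
    ∀ fuel l cur a acc, (PySem.Chars.splitOn.go sep fuel l cur (a :: acc)).head? = (a :: acc).getLast? := by
  intro fuel
  induction fuel with
  | zero =>
    intro l cur a acc
    rw [PySem.Chars.splitOn.go]
    simp [List.head?_reverse, List.getLast?_cons]
  | succ f ih =>
    intro l cur a acc
    cases l with
    | nil =>
      rw [PySem.Chars.splitOn.go]
      · simp [List.head?_reverse, List.getLast?_cons]
      · omega
    | cons c rest =>
      rw [PySem.Chars.splitOn.go]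
      split
      · rw [ih]
        simp [List.getLast?_cons_cons]
      · exact ih rest (c :: cur) a acc

lemma infix_iff_drop (sub s : List Char) : sub <:+: s ↔ ∃ j, sub <+: s.drop j := by
  rw [← PySem.Chars.isIn_iff_infix, ← PySem.Chars.exists_prefix_drop_iff_isIn]

-- the head piece of splitOn contains no occurrence of the (non-empty) separator
lemma go_head_no_sep (sep : List Char) (hsep : sep ≠ []) :
    ∀ fuel l cur, l.length < fuel →
      (∀ j, j < cur.length → ¬ sep <+: (cur.reverse ++ l).drop j) →
      ¬ sep <:+: ((PySem.Chars.splitOn.go sep fuel l cur []).headD []) := by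
  intro fuel
  induction fuel with
  | zero => intro l cur hlt; omega
  | succ f ih =>
    intro l cur hlt hinv
    cases l with
    | nil =>
      rw [PySem.Chars.splitOn.go]
      · simp only [List.reverse_cons, List.reverse_nil, List.nil_append, List.headD_cons]
        intro hinf
        obtain ⟨j, hj⟩ := (infix_iff_drop sep cur.reverse).mp hinf
        by_cases hjlen : j < cur.length
        · exact hinv j hjlen (by simpa using hj)
        · have : List.drop j cur.reverse = [] :=
            List.drop_eq_nil_of_le (by simp; omega)
          rw [this, List.prefix_nil] at hj
          exact hsep hj
      · omega
    | cons c rest =>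
      rw [PySem.Chars.splitOn.go]
      split
      · -- separator found here: the head piece is cur.reverse
        next hpre =>
        rw [myHeadD, go_head_acc]
        simp only [List.getLast?_singleton, Option.getD_some]
        intro hinf
        obtain ⟨j, hj⟩ := (infix_iff_drop sep cur.reverse).mp hinf
        by_cases hjlen : j < cur.length
        · apply hinv j hjlen
          rw [List.drop_append_of_le_length (by simp; omega)]
          exact hj.trans (List.prefix_append _ _)
        · have : List.drop j cur.reverse = [] :=
            List.drop_eq_nil_of_le (by simp; omega)
          rw [this, List.prefix_nil] at hj
          exact hsep hj
      · -- no separator here: scan one character forward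
        next hpre =>
        apply ih rest (c :: cur) (by simpa using hlt)
        intro j hjlt
        have harr : (c :: cur).reverse ++ rest = cur.reverse ++ (c :: rest) := by simp
        rw [harr]
        simp only [List.length_cons] at hjlt
        by_cases hjc : j < cur.length
        · exact hinv j hjc
        · have hj : j = cur.length := by omega
          subst hj
          have : List.drop cur.length (cur.reverse ++ (c :: rest)) = c :: rest := by
            have := List.drop_left (l₁ := cur.reverse) (l₂ := c :: rest)
            simpa using this
          rw [this]
          intro hcontra
          exact hpre (List.isPrefixOf_iff_prefix.mpr hcontra)

lemma splitOn_head_no_sep (s sep : List Char) (hsep : sep ≠ []) :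
    ¬ sep <:+: ((PySem.Chars.splitOn s sep).headD []) := by
  unfold PySem.Chars.splitOn
  exact go_head_no_sep sep hsep (s.length + 1) s [] (by omega) (by simp)

-- an occurrence of sub in u ++ v lies entirely in v when no character of u occurs in sub
lemma infix_append_left_iff {u v sub : List Char} (hne : sub ≠ []) (h : ∀ c ∈ u, c ∉ sub) :
    sub <:+: u ++ v ↔ sub <:+: v := by
  constructor
  · intro hinf
    obtain ⟨a, c, hac⟩ := hinf
    rw [List.append_assoc] at hac
    by_cases hlen : u.length ≤ a.length
    · refine ⟨a.drop u.length, c, ?_⟩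
      have : List.drop u.length (a ++ (sub ++ c)) = a.drop u.length ++ (sub ++ c) :=
        List.drop_append_of_le_length hlen
      calc a.drop u.length ++ sub ++ c = List.drop u.length (a ++ (sub ++ c)) := by
            rw [this]; simp [List.append_assoc]
        _ = List.drop u.length (u ++ v) := by rw [hac]
        _ = v := List.drop_left
    · exfalso
      rw [Nat.not_le] at hlen
      have h0 : 0 < sub.length := List.length_pos_of_ne_nil hne
      have hlt : a.length < (u ++ v).length := by simp; omega
      have e1 : (u ++ v)[a.length]'hlt = u[a.length]'hlen := List.getElem_append_left hlen
      have hlt2 : a.length < (a ++ (sub ++ c)).length := by simp; omega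
      have e2 : (a ++ (sub ++ c))[a.length]'hlt2 = (sub ++ c)[0]'(by simp; omega) := by
        rw [List.getElem_append_right (Nat.le_refl _)]
        simp
      have e3 : (sub ++ c)[0]'(by simp; omega) = sub[0]'h0 := List.getElem_append_left h0
      have heq : u[a.length]'hlen = sub[0]'h0 := by
        rw [← e1, List.getElem_of_eq hac.symm hlt, e2, e3]
      exact h _ (List.getElem_mem hlen) (heq ▸ List.getElem_mem h0)
  · intro hinf
    exact hinf.trans (List.suffix_append u v).isInfix

lemma infix_append_right_iff {v w sub : List Char} (hne : sub ≠ []) (h : ∀ c ∈ w, c ∉ sub) :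
    sub <:+: v ++ w ↔ sub <:+: v := by
  rw [← List.reverse_infix (l₁ := sub) (l₂ := v ++ w), List.reverse_append]
  rw [infix_append_left_iff (by simpa using hne) (by intro c hc; rw [List.mem_reverse] at hc ⊢; exact h c hc)]
  exact List.reverse_infix

lemma ptWrap_zero (x : List Char) : ptWrap 0 x = x := by simp [ptWrap]

lemma ptWrap_succ (d : Nat) (x : List Char) :
    ptWrap (d + 1) x = "List<".toList ++ ptWrap d x ++ ">".toList := by
  unfold ptWrap
  rw [List.replicate_succ' (n := d) (a := '>'), List.replicate_succ (n := d)]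
  simp [List.append_assoc]

lemma notInfix_ptWrap (sub x : List Char) (d : Nat) (hne : sub ≠ [])
    (hL : ∀ c ∈ "List<".toList, c ∉ sub) (hG : ∀ c ∈ ">".toList, c ∉ sub)
    (hx : ¬ sub <:+: x) : ¬ sub <:+: ptWrap d x := by
  induction d with
  | zero => simpa [ptWrap_zero] using hx
  | succ d ih =>
    rw [ptWrap_succ]
    rw [infix_append_right_iff hne hG, infix_append_left_iff hne hL]
    exact ih

-- the scalar if/elif chain keeps a clean (no ' or ', no ', ') value clean
lemma scalar_clean (x : List Char) (c : Bool)
    (hx_or : ¬ " or ".toList <:+: x) (hx_cm : ¬ ", ".toList <:+: x) :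
    ¬ " or ".toList <:+:
        (if x = "Integer".toList then (if c then "Long".toList else "Int".toList)
         else if x = "True".toList then "Boolean".toList
         else if x = "Float number".toList then "Double".toList else x) ∧
    ¬ ", ".toList <:+:
        (if x = "Integer".toList then (if c then "Long".toList else "Int".toList)
         else if x = "True".toList then "Boolean".toList
         else if x = "Float number".toList then "Double".toList else x) := by
  split_ifs <;> refine ⟨?_, ?_⟩ <;> first | assumption | decide

-- the transformed bare base contains neither ' or ' nor ', '
lemma transform_clean (b : List Char) (fn d : String) (hpre : PreBase b) :
    ¬ " or ".toList <:+: ptTransform b fn d ∧ ¬ ", ".toList <:+: ptTransform b fn d := by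
  unfold PreBase at hpre
  simp only [ptTransform]
  by_cases hor : PySem.Chars.isIn " or ".toList b = true
  · by_cases hmk : PySem.Chars.isIn "Markup".toList b = true
    · rw [if_pos hor, if_pos hmk] at hpre ⊢
      rw [if_neg (show ¬(PySem.Chars.isIn ", ".toList "Markup".toList = true) by decide)]
      refine scalar_clean _ _ ?_ ?_ <;> decide
    · rw [if_pos hor, if_neg hmk] at hpre ⊢
      have hno_or : ¬ " or ".toList <:+: (PySem.Chars.splitOn b " or ".toList).headD [] :=
        splitOn_head_no_sep b (" or ".toList) (by decide)
      by_cases hcm : PySem.Chars.isIn ", ".toList ((PySem.Chars.splitOn b " or ".toList).headD []) = true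
      · rw [if_pos hcm, if_pos (hpre hcm)]
        refine scalar_clean _ _ ?_ ?_ <;> decide
      · rw [if_neg hcm]
        refine scalar_clean _ _ hno_or ?_
        rw [← PySem.Chars.isIn_eq_false_iff]; simpa using hcm
  · rw [if_neg hor] at hpre ⊢
    by_cases hcm : PySem.Chars.isIn ", ".toList b = true
    · rw [if_pos hcm, if_pos (hpre hcm)]
      refine scalar_clean _ _ ?_ ?_ <;> decide
    · rw [if_neg hcm]
      refine scalar_clean _ _ ?_ ?_
      · rw [← PySem.Chars.isIn_eq_false_iff]; simpa using hor
      · rw [← PySem.Chars.isIn_eq_false_iff]; simpa using hcm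

-- A's three sequential scalar ifs equal B's if/elif chain
lemma scalar_seq_eq (x : List Char) (c : Bool) :
    (let t4 := if x = "Integer".toList then (if c then "Long".toList else "Int".toList) else x
     let t5 := if t4 = "True".toList then "Boolean".toList else t4
     if t5 = "Float number".toList then "Double".toList else t5)
    = (if x = "Integer".toList then (if c then "Long".toList else "Int".toList)
       else if x = "True".toList then "Boolean".toList
       else if x = "Float number".toList then "Double".toList else x) := by
  by_cases h1 : x = "Integer".toList
  · subst h1; cases c <;> decide
  · by_cases h2 : x = "True".toList
    · subst h2; cases c <;> decide
    · by_cases h3 : x = "Float number".toList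
      · subst h3; cases c <;> decide
      · simp only [if_neg h1, if_neg h2, if_neg h3]

lemma whileA_not_start (g : Nat) (tn : List Char) (fn tyn d : String)
    (h : PySem.Chars.startswith tn "Array of ".toList = false) :
    ptAWhile g tn fn tyn d = tn := by
  cases g with
  | zero => rw [ptAWhile]
  | succ g => rw [ptAWhile, if_neg (by rw [h]; simp)]

lemma start_wrap_false (X : List Char) :
    PySem.Chars.startswith ("List<".toList ++ X) ("Array of ".toList) = false := by
  simp [PySem.Chars.startswith, List.isPrefixOf]

lemma ptStripGo_not_start (f : Nat) (tn : List Char)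
    (h : PySem.Chars.startswith tn "Array of ".toList = false) : ptStripGo f tn = (0, tn) := by
  cases f with
  | zero => rfl
  | succ f => rw [ptStripGo]; simp only [h, Bool.false_eq_true, if_false]

lemma ptStripGo_congr : ∀ f g (tn : List Char), tn.length ≤ f → tn.length ≤ g →
    ptStripGo f tn = ptStripGo g tn := by
  intro f
  induction f with
  | zero =>
    intro g tn hf hg
    have htn : tn = [] := List.eq_nil_of_length_eq_zero (by omega)
    subst htn
    rw [ptStripGo_not_start 0 [] (by decide), ptStripGo_not_start g [] (by decide)]
  | succ f ih =>
    intro g tn hf hg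
    by_cases hs : PySem.Chars.startswith tn "Array of ".toList = true
    · have h9 : 9 ≤ tn.length := by
        have := ((PySem.Chars.startswith_iff tn "Array of ".toList).mp hs).length_le
        simpa using this
      obtain ⟨g', rfl⟩ : ∃ g', g = g' + 1 := ⟨g - 1, by omega⟩
      rw [ptStripGo, ptStripGo]
      rw [if_pos hs, if_pos hs, ih g' (tn.drop 9) (by simp; omega) (by simp; omega)]
    · rw [Bool.not_eq_true] at hs
      rw [ptStripGo_not_start _ _ hs, ptStripGo_not_start _ _ hs]

lemma ptStrip_not_start (tn : List Char) (h : PySem.Chars.startswith tn "Array of ".toList = false) :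
    ptStrip tn = (0, tn) := by
  unfold ptStrip
  exact ptStripGo_not_start _ _ h

lemma ptStrip_start (tn : List Char) (h : PySem.Chars.startswith tn "Array of ".toList = true) :
    ptStrip tn = ((ptStrip (tn.drop 9)).1 + 1, (ptStrip (tn.drop 9)).2) := by
  unfold ptStrip
  have h9 : 9 ≤ tn.length := by
    have := ((PySem.Chars.startswith_iff tn "Array of ".toList).mp h).length_le
    simpa using this
  obtain ⟨k, hk⟩ : ∃ k, tn.length = k + 1 := ⟨tn.length - 1, by omega⟩
  rw [hk, ptStripGo, if_pos h]
  show ((ptStripGo k (tn.drop 9)).1 + 1, (ptStripGo k (tn.drop 9)).2) = _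
  rw [ptStripGo_congr k (tn.drop 9).length (tn.drop 9) (by simp; omega) (Nat.le_refl _)]

-- the depth/base returned by ptStrip: 'Array of '*depth is the maximal leading repetition, and
-- the base is what follows it
lemma ptStrip_facts : ∀ n (tn : List Char), tn.length ≤ n →
    (List.replicate (ptStrip tn).1 "Array of ".toList).flatten <+: tn ∧
    ¬ (List.replicate ((ptStrip tn).1 + 1) "Array of ".toList).flatten <+: tn ∧
    (ptStrip tn).2 = tn.drop (9 * (ptStrip tn).1) := by
  intro n
  induction n with
  | zero =>
    intro tn hlen
    have htn : tn = [] := List.eq_nil_of_length_eq_zero (by omega)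
    subst htn
    refine ⟨by simp [ptStrip, ptStripGo], ?_, by simp [ptStrip, ptStripGo]⟩
    simp [ptStrip, ptStripGo, List.replicate_succ]
  | succ n ih =>
    intro tn hlen
    by_cases hs : PySem.Chars.startswith tn "Array of ".toList = true
    · have hpre : "Array of ".toList <+: tn := (PySem.Chars.startswith_iff _ _).mp hs
      obtain ⟨rest, hrest⟩ := hpre
      have hdrop : tn.drop 9 = rest := by
        rw [← hrest]
        have := List.drop_left (l₁ := "Array of ".toList) (l₂ := rest)
        simpa using this
      have hrlen : rest.length ≤ n := by
        have : tn.length = 9 + rest.length := by rw [← hrest]; simp; omega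
        omega
      obtain ⟨ih1, ih2, ih3⟩ := ih rest hrlen
      rw [ptStrip_start tn hs, hdrop]
      refine ⟨?_, ?_, ?_⟩
      · simp only [List.replicate_succ, List.flatten_cons]
        rw [← hrest]
        rw [List.prefix_append_right_inj]
        exact ih1
      · simp only [List.replicate_succ, List.flatten_cons]
        rw [← hrest]
        rw [List.prefix_append_right_inj]
        exact ih2
      · rw [ih3, ← hdrop, List.drop_drop]
        congr 1
        ring
    · rw [Bool.not_eq_true] at hs
      rw [ptStrip_not_start tn hs]
      refine ⟨by simp, ?_, by simp⟩
      simp only [List.replicate_succ, List.replicate_zero, List.flatten_cons, List.flatten_nil,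
        List.append_nil]
      intro hcon
      rw [← PySem.Chars.startswith_iff] at hcon
      rw [hs] at hcon
      cases hcon

-- the closed-form disjunct of Pre_ gives the raise-free condition on ptStrip's base
lemma pre4_imp_prebase (tn : List Char)
    (h4 : ∀ k : Nat, k ≤ tn.length →
      (List.replicate k "Array of ".toList).flatten <+: tn →
      ¬ (List.replicate (k + 1) "Array of ".toList).flatten <+: tn →
      (PySem.Chars.isIn ", ".toList (pvOrCut (tn.drop (9 * k))) = true →
       PySem.Chars.isIn "InputMedia".toList (pvOrCut (tn.drop (9 * k))) = true)) :
    PreBase (ptStrip tn).2 := by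
  obtain ⟨hp, hnp, he⟩ := ptStrip_facts tn.length tn (Nat.le_refl _)
  have hklen : (ptStrip tn).1 ≤ tn.length := by
    have hle := hp.length_le
    have hfl : (List.replicate (ptStrip tn).1 "Array of ".toList).flatten.length
        = (ptStrip tn).1 * 9 := by
      simp [List.length_flatten, List.map_replicate, List.sum_replicate, smul_eq_mul]
    omega
  have := h4 (ptStrip tn).1 hklen hp hnp
  rw [← he] at this
  unfold PreBase
  unfold pvOrCut at this
  exact this

lemma replace1_of_prefix (tn : List Char) (h : PySem.Chars.startswith tn "Array of ".toList = true) :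
    pvReplace1 tn "Array of ".toList [] = tn.drop 9 := by
  have hpre : "Array of ".toList <+: tn := (PySem.Chars.startswith_iff _ _).mp h
  have hinfix : "Array of ".toList <:+: tn := hpre.isInfix
  have hfind0 : PySem.Chars.find tn "Array of ".toList = 0 := by
    have hnn : 0 ≤ PySem.Chars.find tn "Array of ".toList :=
      (PySem.Chars.find_nonneg_iff _ _).mpr hinfix
    by_contra hne0
    have hpos : 0 < (PySem.Chars.find tn "Array of ".toList).toNat := by omega
    have := ((PySem.Chars.find_spec hnn).2) 0 hpos
    simp at this
    exact this hpre
  simp only [pvReplace1]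
  rw [hfind0]
  simp

-- the non-early part of B
def ptAltCore (tn : List Char) (fn d : String) : List Char :=
  ptWrap (ptStrip tn).1 (ptTransform (ptStrip tn).2 fn d)

-- the early-return conditions of the Python, as the ports test them
def ptEarly1 (fn tyn : String) : Bool :=
  CUSTOM_TYPES.contains tyn && (CUSTOM_TYPES.getD tyn PySem.Dict.empty).contains fn
def ptEarly2 (fn : String) : Bool :=
  (CUSTOM_TYPES.getD "__GLOBAL__" PySem.Dict.empty).contains fn

lemma chars_list_not_or : ∀ c ∈ "List<".toList, c ∉ " or ".toList := by
  intro c hc; fin_cases hc <;> decide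
lemma chars_list_not_cm : ∀ c ∈ "List<".toList, c ∉ ", ".toList := by
  intro c hc; fin_cases hc <;> decide
lemma chars_gt_not_or : ∀ c ∈ ">".toList, c ∉ " or ".toList := by
  intro c hc; fin_cases hc <;> decide
lemma chars_gt_not_cm : ∀ c ∈ ">".toList, c ∉ ", ".toList := by
  intro c hc; fin_cases hc <;> decide

-- MAIN INVARIANT: with enough fuel, no early return and a raise-free base, A's recursion
-- computes exactly B's strip-transform-wrap value
lemma main_invariant :
    ∀ f tn (fn tyn d : String), tn.length + 2 ≤ f →
      ptEarly1 fn tyn = false → ptEarly2 fn = false →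
      PreBase (ptStrip tn).2 →
      ptA f tn fn tyn d = ptAltCore tn fn d := by
  intro f
  induction f using Nat.strong_induction_on with
  | _ f ih =>
    intro tn fn tyn d hf he1 he2 hpre
    obtain ⟨f', rfl⟩ : ∃ f', f = f' + 1 := ⟨f - 1, by omega⟩
    unfold ptEarly1 at he1
    unfold ptEarly2 at he2
    show ptA (f' + 1) tn fn tyn d = ptAltCore tn fn d
    rw [ptA]
    simp only [he1, he2, Bool.false_eq_true, if_false]
    by_cases hs : PySem.Chars.startswith tn "Array of ".toList = true
    · -- at least one 'Array of ' layer
      have h9 : 9 ≤ tn.length := by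
        have := ((PySem.Chars.startswith_iff tn "Array of ".toList).mp hs).length_le
        simpa using this
      obtain ⟨g, rfl⟩ : ∃ g, f' = g + 1 := ⟨f' - 1, by omega⟩
      rw [ptAWhile]
      simp only [hs, if_true]
      rw [replace1_of_prefix tn hs]
      have hlen : (tn.drop 9).length + 2 ≤ g := by simp; omega
      have hstrip := ptStrip_start tn hs
      have hpre' : PreBase (ptStrip (tn.drop 9)).2 := by rw [hstrip] at hpre; exact hpre
      have hrec : ptA g (tn.drop 9) fn tyn d = ptAltCore (tn.drop 9) fn d :=
        ih g (by omega) (tn.drop 9) fn tyn d hlen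
          (by unfold ptEarly1; exact he1) (by unfold ptEarly2; exact he2) hpre'
      rw [hrec]
      set X := ptAltCore (tn.drop 9) fn d with hX
      -- X = ptWrap d' (transformed base): it contains no ' or ' and no ', '
      have hclean := transform_clean (ptStrip (tn.drop 9)).2 fn d hpre'
      have hXor : ¬ " or ".toList <:+: X :=
        notInfix_ptWrap _ _ _ (by decide) chars_list_not_or chars_gt_not_or hclean.1
      have hXcm : ¬ ", ".toList <:+: X :=
        notInfix_ptWrap _ _ _ (by decide) chars_list_not_cm chars_gt_not_cm hclean.2
      -- the wrapped string: no further 'Array of ' layer, no ' or ', no ', ', not a scalar literal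
      have hw : ("List<".toList ++ X ++ ">".toList) = "List<".toList ++ (X ++ ">".toList) := by
        simp
      have hnostart : PySem.Chars.startswith ("List<".toList ++ X ++ ">".toList) ("Array of ".toList) = false := by
        rw [hw]; exact start_wrap_false _
      rw [whileA_not_start g _ fn tyn d hnostart]
      have hor : PySem.Chars.isIn " or ".toList ("List<".toList ++ X ++ ">".toList) = false := by
        rw [PySem.Chars.isIn_eq_false_iff]
        rw [infix_append_right_iff (by decide) chars_gt_not_or,
            infix_append_left_iff (by decide) chars_list_not_or]
        exact hXor
      have hcm : PySem.Chars.isIn ", ".toList ("List<".toList ++ X ++ ">".toList) = false := by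
        rw [PySem.Chars.isIn_eq_false_iff]
        rw [infix_append_right_iff (by decide) chars_gt_not_cm,
            infix_append_left_iff (by decide) chars_list_not_cm]
        exact hXcm
      simp only [hor, hcm, Bool.false_eq_true, if_false]
      have hni : ("List<".toList ++ X ++ ">".toList) ≠ "Integer".toList := by simp
      have hnt : ("List<".toList ++ X ++ ">".toList) ≠ "True".toList := by simp
      have hnf : ("List<".toList ++ X ++ ">".toList) ≠ "Float number".toList := by simp
      simp only [hni, hnt, hnf, if_false]
      -- and it equals B's value with one more wrap layer
      unfold ptAltCore
      rw [hstrip]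
      simp only
      rw [ptWrap_succ]
      rfl
    · -- no 'Array of ' layer: the while loop never runs and the scalar chains coincide
      rw [Bool.not_eq_true] at hs
      rw [whileA_not_start f' tn fn tyn d hs]
      have hstrip := ptStrip_not_start tn hs
      unfold ptAltCore
      rw [hstrip]
      simp only [ptWrap_zero]
      unfold ptTransform
      exact scalar_seq_eq _ _

-- ===== VERDICT (by name: the statement is the Claim_ definition above) =====
theorem process_type_spec : Claim_equal_process_type := by
  unfold Claim_equal_process_type
  intro typename fn tyn d _ hpre
  unfold Spec_process_type process_type process_type_alt
  by_cases he1 : ptEarly1 fn tyn = true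
  · unfold ptEarly1 at he1
    rw [ptA]
    simp [he1]
  · rw [Bool.not_eq_true] at he1
    by_cases he2 : ptEarly2 fn = true
    · unfold ptEarly1 at he1
      unfold ptEarly2 at he2
      rw [ptA]
      simp [he1, he2]
    · rw [Bool.not_eq_true] at he2
      have hbase : PreBase (ptStrip typename.toList).2 := by
        unfold Pre_process_type at hpre
        rcases hpre with ⟨h1, h2⟩ | ⟨h1, h2⟩ | h1 | h4
        · exfalso; subst h1; subst h2; exact absurd he1 (by decide)
        · exfalso; subst h1; subst h2; exact absurd he1 (by decide)
        · exfalso; subst h1; exact absurd he2 (by decide)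
        · exact pre4_imp_prebase typename.toList h4
      have := main_invariant (typename.toList.length + 2) typename.toList fn tyn d
        (by omega) he1 he2 hbase
      rw [this]
      unfold ptEarly1 at he1
      unfold ptEarly2 at he2
      simp [he1, he2, ptAltCore]
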